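-- pv_equiv track=rewrite | github.com/miliar/Code_Jam_Webscraper | solutions_python/solutions_year16_round0_nr2/4004.py | solve
-- ===== SOURCE A (Python) =====
-- def flip(state, n):
--     flipped_bits = []
--     for i in range(n-1, -1, -1):
--         flipped_bits.append(not state[i])
--     return flipped_bits + state[n:]
--
-- def get_full_state(state):
--     return list(map(lambda n: True, state))
--
-- def solve(state):
--     moving_state = get_full_state(state)
--     # reversed_state = get_reversed_state(state)
--     flip_count = 0
--     for i in range(len(state)-1, -1, -1):
--         if moving_state[i] != state[i]:
--             moving_state = flip(moving_state, i)
--             flip_count = flip_count + 1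
--     return flip_count
-- ===== SOURCE B (Python) =====
-- def solve(state):
--     count = 0
--     prev = True
--     for b in reversed(state):
--         if b != prev:
--             count += 1
--             prev = b
--     return count
-- ===== Notes on version B (the rewrite author's own statement) =====
-- stated objective: faster
-- what changed: Replaces the simulation that rebuilds the whole flipped prefix list at every mismatch with a single reverse pass that only tracks the last seen block value and counts block changes starting from True.
import Mathlib
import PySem

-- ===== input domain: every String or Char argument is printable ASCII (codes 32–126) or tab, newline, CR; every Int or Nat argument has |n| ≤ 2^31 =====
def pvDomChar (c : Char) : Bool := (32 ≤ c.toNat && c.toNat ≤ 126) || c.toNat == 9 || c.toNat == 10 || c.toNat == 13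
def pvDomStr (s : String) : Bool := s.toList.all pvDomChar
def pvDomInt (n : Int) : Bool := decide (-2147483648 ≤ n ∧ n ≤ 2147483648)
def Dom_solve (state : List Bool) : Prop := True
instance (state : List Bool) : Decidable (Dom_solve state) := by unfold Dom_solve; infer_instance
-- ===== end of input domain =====

-- B replaces A's quadratic prefix-flip simulation by one reverse pass counting block changes (faster).

-- ===== PORT A =====
-- flip(state, n): reversed, negated prefix of length n, plus the untouched tail state[n:].
-- (indices read inside solve are always in range, so pyGetD's default is never used)
def pyFlip (state : List Bool) (n : Int) : List Bool :=
  ((PySem.List.pyRange (n - 1) (-1) (-1)).foldl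
      (fun acc i => acc ++ [!(PySem.List.pyGetD state i false)]) ([] : List Bool))
    ++ PySem.List.slice state (some n) none

def getFullState (state : List Bool) : List Bool := state.map (fun _ => true)

def solveStep (state : List Bool) (acc : List Bool × Int) (i : Int) : List Bool × Int :=
  if PySem.List.pyGetD acc.1 i false != PySem.List.pyGetD state i false
  then (pyFlip acc.1 i, acc.2 + 1) else acc

def solve (state : List Bool) : Int :=
  ((PySem.List.pyRange ((state.length : Int) - 1) (-1) (-1)).foldl
      (solveStep state) (getFullState state, 0)).2

-- ===== PORT B =====
def altStep (acc : Bool × Int) (b : Bool) : Bool × Int :=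
  if b != acc.1 then (b, acc.2 + 1) else acc

def solve_alt (state : List Bool) : Int :=
  (state.reverse.foldl altStep (true, 0)).2

-- ===== PRECONDITION & SPEC =====
def Spec_solve (state : List Bool) (out : Int) : Prop := out = solve_alt state
instance (state : List Bool) (out : Int) : Decidable (Spec_solve state out) := by unfold Spec_solve; infer_instance

-- ===== CLAIM (what is proved, stated in full; the proofs are below) =====
def Claim_equal_solve : Prop := ∀ (state : List Bool), Dom_solve state → Spec_solve state (solve state)

-- ===== LEMMAS AND PROOFS =====

lemma getElem_of_take_replicate (moving : List Bool) (k : Nat) (v : Bool)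
    (hpre : moving.take k = List.replicate k v) (m : Nat) (hm : m < k) (hml : m < moving.length) :
    moving[m] = v := by
  have h1 : (moving.take k)[m]? = some moving[m] := by
    rw [List.getElem?_take_of_lt hm]
    exact List.getElem?_eq_getElem hml
  rw [hpre] at h1
  simp [hm] at h1
  exact h1.symm

lemma pyFlip_replicate (moving : List Bool) (k : Nat) (v : Bool)
    (hk : k ≤ moving.length) (hpre : moving.take k = List.replicate k v) :
    pyFlip moving (k : Int) = List.replicate k (!v) ++ moving.drop k := by
  unfold pyFlip
  rw [PySem.List.slice_from_natCast, PySem.List.foldl_append_singleton_eq_map,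
    PySem.List.pyRange_neg_one]
  have hkk : ((k : Int) - 1 - -1).toNat = k := by omega
  rw [hkk, List.map_map, List.nil_append]
  congr 1
  apply List.eq_replicate_iff.mpr
  constructor
  · simp
  · intro b hb
    rw [List.mem_map] at hb
    obtain ⟨j, hj, hb⟩ := hb
    rw [List.mem_range] at hj
    have h0 : (0:Int) ≤ (k:Int) - 1 - j := by omega
    have h1 : ((k:Int) - 1 - j) < moving.length := by omega
    simp only [Function.comp] at hb
    rw [PySem.List.pyGetD_eq_getElem moving false h0 h1] at hb
    have := getElem_of_take_replicate moving k v hpre (((k:Int) - 1 - (j:Int)).toNat) (by omega) (by omega)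
    rw [this] at hb
    exact hb.symm

lemma key (state : List Bool) : ∀ (k : Nat) (moving : List Bool) (v : Bool) (c : Int),
    k ≤ state.length → moving.length = state.length →
    moving.take k = List.replicate k v →
    ((PySem.List.pyRange ((k : Int) - 1) (-1) (-1)).foldl (solveStep state) (moving, c)).2
      = (((state.take k).reverse).foldl altStep (v, c)).2 := by
  intro k
  induction k with
  | zero =>
    intro moving v c _ _ _
    rw [show ((0:Nat):Int) - 1 = -1 by norm_num, PySem.List.pyRange_neg_one_eq_nil le_rfl]
    simp [List.foldl]
  | succ k ih =>
    intro moving v c hk hlen hpre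
    have hkc : ((k+1 : Nat) : Int) - 1 = (k : Int) := by push_cast; ring
    rw [hkc, PySem.List.pyRange_neg_one_cons (by omega : (-1:Int) < (k:Int)), List.foldl_cons]
    have hks : k < state.length := by omega
    have hkm : k < moving.length := by omega
    have hmv : moving[k] = v :=
      getElem_of_take_replicate moving (k+1) v hpre k (by omega) hkm
    have hA : PySem.List.pyGetD moving (k : Int) false = v := by
      rw [PySem.List.pyGetD_eq_getElem moving false (by omega) (by exact_mod_cast hkm)]
      simpa using hmv
    have hS : PySem.List.pyGetD state (k : Int) false = state[k] := by
      rw [PySem.List.pyGetD_eq_getElem state false (by omega) (by exact_mod_cast hks)]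
      simp
    have htake : state.take (k+1) = state.take k ++ [state[k]] := by
      rw [List.take_succ, List.getElem?_eq_getElem hks]
      rfl
    rw [htake, List.reverse_append, List.reverse_singleton, List.singleton_append,
      List.foldl_cons]
    have htk : moving.take k = List.replicate k v := by
      have := congrArg (List.take k) hpre
      rwa [List.take_take, min_eq_left (Nat.le_succ k), List.take_replicate,
        min_eq_left (Nat.le_succ k)] at this
    by_cases hb : state[k] = v
    · have hcondA : solveStep state (moving, c) (k : Int) = (moving, c) := by
        unfold solveStep
        rw [hA, hS, hb]
        simp
      have hcondB : altStep (v, c) state[k] = (v, c) := by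
        unfold altStep
        rw [hb]; simp
      rw [hcondA, hcondB]
      exact ih moving v c (by omega) hlen htk
    · have hbv : state[k] = !v := by cases hv : v <;> simp [hv] at hb ⊢ <;> simp [hb]
      have hcondA : solveStep state (moving, c) (k : Int) = (pyFlip moving (k:Int), c + 1) := by
        unfold solveStep
        rw [hA, hS, hbv]
        simp
      have hcondB : altStep (v, c) state[k] = (!v, c + 1) := by
        unfold altStep
        rw [hbv]; simp
      rw [hcondA, hcondB]
      rw [pyFlip_replicate moving k v (by omega) htk]
      refine ih _ (!v) (c+1) (by omega) ?_ ?_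
      · rw [List.length_append, List.length_replicate, List.length_drop]
        omega
      · rw [List.take_append_of_le_length (by rw [List.length_replicate])]
        simp [List.take_replicate]

-- ===== VERDICT (by name: the statement is the Claim_ definition above) =====
theorem solve_spec : Claim_equal_solve := by
  intro state _
  unfold Spec_solve solve solve_alt getFullState
  rw [key state state.length (state.map fun _ => true) true 0 le_rfl (by simp) (by simp),
    List.take_length]
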